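-- pv_equiv track=rewrite | github.com/Mjvolk3/torchcell | experiments/010-kuzmin-tmi/scripts/select_12_and_24_genes_top_triples.py | compute_gene_list_overlaps
-- ===== SOURCE A (Python) =====
-- def compute_gene_list_overlaps(
--     selected_genes: list[str], gene_lists: dict[str, set[str]]
-- ) -> dict[str, int]:
--     """
--     Compute overlap counts between selected genes and each gene list.
--
--     Args:
--         selected_genes: List of selected gene names
--         gene_lists: Dict mapping list name to set of genes
--
--     Returns:
--         Dict mapping list name to overlap count
--     """
--     selected_set = set(selected_genes)
--     overlaps = {}
--     for name, genes in gene_lists.items():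
--         overlaps[f"overlap_{name}"] = len(selected_set & genes)
--     return overlaps
-- ===== SOURCE B (Python) =====
-- def compute_gene_list_overlaps(
--     selected_genes: list[str], gene_lists: dict[str, set[str]]
-- ) -> dict[str, int]:
--     """Zero-init a counter per list name, build an inverted index gene -> list
--     names once, then bump counters by probing each distinct selected gene in
--     the index (no per-list set intersection)."""
--     overlaps = {f"overlap_{name}": 0 for name in gene_lists}
--     index = {}
--     for name, genes in gene_lists.items():
--         for gene in genes:
--             index.setdefault(gene, []).append(name)
--     for gene in set(selected_genes):
--         for name in index.get(gene, []):
--             overlaps[f"overlap_{name}"] += 1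
--     return overlaps
-- ===== Notes on version B (the rewrite author's own statement) =====
-- stated objective: alternative
-- what changed: Instead of one set-intersection per gene list, B zero-initializes a counter per list name, builds an inverted index from gene to the names of the lists containing it, and then increments counters by probing each distinct selected gene in that index.
import Mathlib
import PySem

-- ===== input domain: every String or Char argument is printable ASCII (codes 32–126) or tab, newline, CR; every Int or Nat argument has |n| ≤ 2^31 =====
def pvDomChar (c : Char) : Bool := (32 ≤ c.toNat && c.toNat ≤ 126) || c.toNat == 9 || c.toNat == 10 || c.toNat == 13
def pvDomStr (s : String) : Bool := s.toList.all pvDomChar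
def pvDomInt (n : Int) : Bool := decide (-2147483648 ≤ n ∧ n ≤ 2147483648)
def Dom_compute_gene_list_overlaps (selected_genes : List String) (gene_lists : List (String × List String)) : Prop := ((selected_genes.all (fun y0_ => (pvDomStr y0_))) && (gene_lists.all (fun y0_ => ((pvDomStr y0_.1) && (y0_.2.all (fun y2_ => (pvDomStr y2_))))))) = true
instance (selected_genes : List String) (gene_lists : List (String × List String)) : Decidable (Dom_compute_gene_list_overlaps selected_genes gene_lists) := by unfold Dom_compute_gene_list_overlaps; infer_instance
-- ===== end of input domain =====

-- B replaces the per-list set intersection by a zero-initialized counter table plus an inverted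
-- index gene -> list names, bumping counters while probing each distinct selected gene; same
-- counts by a different algorithm.


-- ===== PORT A =====
def compute_gene_list_overlaps (selected_genes : List String) (gene_lists : List (String × List String)) : List (String × Int) :=
  let selected_set : PySem.Set String := PySem.Set.ofList selected_genes
  (gene_lists.foldl
    (fun overlaps p =>
      PySem.Dict.insert overlaps ("overlap_" ++ p.1)
        ((PySem.Set.inter selected_set p.2).length : Int))
    PySem.Dict.empty).items

-- ===== PORT B =====
def compute_gene_list_overlaps_alt (selected_genes : List String) (gene_lists : List (String × List String)) : List (String × Int) :=
  let overlaps0 : PySem.Dict String Int :=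
    gene_lists.foldl (fun d p => PySem.Dict.insert d ("overlap_" ++ p.1) 0) PySem.Dict.empty
  -- index.setdefault(gene, []).append(name)  ==  index[gene] = index.get(gene, []) + [name]
  let index : PySem.Dict String (List String) :=
    gene_lists.foldl
      (fun idx p => p.2.foldl (fun idx g => PySem.Dict.modify idx g [] (· ++ [p.1])) idx)
      PySem.Dict.empty
  ((PySem.Set.ofList selected_genes).foldl
    (fun d g =>
      (index.getD g []).foldl
        (fun d name => PySem.Dict.modify d ("overlap_" ++ name) 0 (· + 1)) d)
    overlaps0).items

-- ===== PRECONDITION & SPEC =====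
-- Pre_ only excludes association lists that represent no Python input of A: a duplicate key in
-- gene_lists (a Python dict cannot carry one) or a duplicate element inside one of the gene
-- lists (they are Python sets).
def Pre_compute_gene_list_overlaps (selected_genes : List String) (gene_lists : List (String × List String)) : Prop :=
  (gene_lists.map Prod.fst).Nodup ∧ ∀ p ∈ gene_lists, p.2.Nodup
instance (selected_genes : List String) (gene_lists : List (String × List String)) : Decidable (Pre_compute_gene_list_overlaps selected_genes gene_lists) := by unfold Pre_compute_gene_list_overlaps; infer_instance
def pvWitness_compute_gene_list_overlaps : List String × (List (String × List String)) :=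
  (["a", "c"], [("x", ["a", "b"]), ("y", [])])
def Spec_compute_gene_list_overlaps (selected_genes : List String) (gene_lists : List (String × List String)) (out : List (String × Int)) : Prop := out = compute_gene_list_overlaps_alt selected_genes gene_lists
instance (selected_genes : List String) (gene_lists : List (String × List String)) (out : List (String × Int)) : Decidable (Spec_compute_gene_list_overlaps selected_genes gene_lists out) := by unfold Spec_compute_gene_list_overlaps; infer_instance

-- ===== CLAIM (what is proved, stated in full; the proofs are below) =====
def Claim_equal_compute_gene_list_overlaps : Prop := ∀ (selected_genes : List String) (gene_lists : List (String × List String)), Dom_compute_gene_list_overlaps selected_genes gene_lists → Pre_compute_gene_list_overlaps selected_genes gene_lists → Spec_compute_gene_list_overlaps selected_genes gene_lists (compute_gene_list_overlaps selected_genes gene_lists)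

-- ===== LEMMAS AND PROOFS =====

-- the "overlap_" prefix keeps distinct names distinct
theorem pv_key_inj {a b : String} (h : "overlap_" ++ a = "overlap_" ++ b) : a = b := by
  apply String.toList_inj.mp
  simpa using congrArg String.toList h

theorem pv_keys_nodup {gl : List (String × List String)}
    (h : (gl.map Prod.fst).Nodup) :
    (gl.map (fun p => "overlap_" ++ p.1)).Nodup := by
  have : gl.map (fun p => "overlap_" ++ p.1)
      = (gl.map Prod.fst).map (fun s => "overlap_" ++ s) := by
    simp [List.map_map, Function.comp]
  rw [this]
  exact List.Nodup.map (fun a b hab => pv_key_inj hab) h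

-- one `overlaps[f"overlap_{n}"] += 1` on the full counter table
theorem pv_bump (gl : List (String × List String)) (f : (String × List String) → Int)
    (hfst : (gl.map Prod.fst).Nodup) {n : String} (hn : n ∈ gl.map Prod.fst) :
    PySem.Dict.modify
      (PySem.Dict.mk (gl.map (fun p => ("overlap_" ++ p.1, f p)))) ("overlap_" ++ n) 0 (· + 1)
    = PySem.Dict.mk (gl.map (fun p =>
        ("overlap_" ++ p.1, f p + if p.1 = n then 1 else 0))) := by
  obtain ⟨p₀, hp₀, hp₀1⟩ := List.mem_map.mp hn
  have hkeys : (PySem.Dict.mk (gl.map (fun p => ("overlap_" ++ p.1, f p)))).keys.Nodup := by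
    simpa [PySem.Dict.keys, List.map_map, Function.comp] using pv_keys_nodup hfst
  have hmem : ("overlap_" ++ n, f p₀)
      ∈ (PySem.Dict.mk (gl.map (fun p => ("overlap_" ++ p.1, f p)))).items := by
    rw [← hp₀1]
    exact List.mem_map_of_mem hp₀
  have hgetD := PySem.Dict.getD_of_mem_items _ hmem hkeys 0
  have hcont : (PySem.Dict.mk (gl.map (fun p => ("overlap_" ++ p.1, f p)))).contains
      ("overlap_" ++ n) = true := by
    rw [PySem.Dict.contains_mk, List.any_eq_true]
    exact ⟨("overlap_" ++ p₀.1, f p₀), List.mem_map_of_mem hp₀, by simp [hp₀1]⟩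
  apply PySem.Dict.ext
  rw [PySem.Dict.modify, hgetD, PySem.Dict.items_insert_of_contains _ _ hcont]
  simp only [List.map_map]
  apply List.map_congr_left
  intro q hq
  by_cases hqn : q.1 = n
  · have hq₀ : q = p₀ := by
      have hinj := List.inj_on_of_nodup_map hfst
      exact hinj hq hp₀ (by rw [hqn, hp₀1])
    simp [Function.comp, hq₀, hp₀1]
  · have : ("overlap_" ++ q.1) ≠ ("overlap_" ++ n) := fun hEq => hqn (pv_key_inj hEq)
    simp [Function.comp, hqn, this]

-- a whole pass `for name in ns: overlaps[f"overlap_{name}"] += 1`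
theorem pv_bumps (gl : List (String × List String))
    (hfst : (gl.map Prod.fst).Nodup) :
    ∀ (ns : List String) (f : (String × List String) → Int),
      (∀ n ∈ ns, n ∈ gl.map Prod.fst) →
      ns.foldl (fun d n => PySem.Dict.modify d ("overlap_" ++ n) 0 (· + 1))
        (PySem.Dict.mk (gl.map (fun p => ("overlap_" ++ p.1, f p))))
      = PySem.Dict.mk (gl.map (fun p =>
          ("overlap_" ++ p.1, f p + (ns.count p.1 : Int)))) := by
  intro ns
  induction ns with
  | nil => intro f _; simp
  | cons n ns ih =>
    intro f hmem
    rw [List.foldl_cons, pv_bump gl f hfst (hmem n List.mem_cons_self),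
      ih _ (fun m hm => hmem m (List.mem_cons_of_mem _ hm))]
    congr 1
    apply List.map_congr_left
    intro p _
    by_cases h : p.1 = n
    · simp only [List.count_cons, h, beq_self_eq_true, if_true]
      push_cast
      ring
    · have h' : ¬ n = p.1 := fun hEq => h hEq.symm
      simp [List.count_cons, h, h']

-- the nested index-building loop, flattened to one loop over (gene, name) pairs
theorem pv_flatten (l : List (String × List String)) (d : PySem.Dict String (List String)) :
    l.foldl (fun idx p => p.2.foldl (fun idx g => PySem.Dict.modify idx g [] (· ++ [p.1])) idx) d
    = (l.flatMap (fun p => p.2.map (fun g => (g, p.1)))).foldl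
        (fun idx q => PySem.Dict.modify idx q.1 [] (· ++ [q.2])) d := by
  induction l generalizing d with
  | nil => simp
  | cons p rest ih =>
    simp only [List.foldl_cons, List.flatMap_cons, List.foldl_append, List.foldl_map]
    exact ih _

-- the flattened pairs, filtered at one gene, are the names of the lists containing it
theorem pv_names (g : String) :
    ∀ (gl : List (String × List String)), (∀ p ∈ gl, p.2.Nodup) →
      ((gl.flatMap (fun p => p.2.map (fun x => (x, p.1)))).filter
        (fun q => q.1 == g)).map (fun x => x.2)
      = (gl.filter (fun p => p.2.contains g)).map Prod.fst := by
  intro gl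
  induction gl with
  | nil => intro _; simp
  | cons p rest ih =>
    intro hnd
    have hp : p.2.Nodup := hnd p List.mem_cons_self
    have hrest := ih (fun q hq => hnd q (List.mem_cons_of_mem _ hq))
    simp only [List.flatMap_cons, List.filter_append, List.map_append, List.filter_cons, hrest]
    simp only [List.filter_map, List.map_map, Function.comp_def]
    by_cases hm : g ∈ p.2
    · have h1 : p.2.count g = 1 := List.count_eq_one_of_mem hp hm
      simp [List.filter_beq, h1, hm]
    · have h0 : p.2.count g = 0 := List.count_eq_zero_of_not_mem hm
      simp [List.filter_beq, h0, hm]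

-- B's counting double loop, with an arbitrary per-gene name list idxf
theorem pv_outer (gl : List (String × List String))
    (hfst : (gl.map Prod.fst).Nodup) (idxf : String → List String)
    (hidx : ∀ g, ∀ n ∈ idxf g, n ∈ gl.map Prod.fst)
    (hcount : ∀ g, ∀ p ∈ gl, ((idxf g).count p.1 : Int) = if p.2.contains g then 1 else 0) :
    ∀ (gs : List String) (f : (String × List String) → Int),
      gs.foldl
        (fun d g =>
          (idxf g).foldl (fun d n => PySem.Dict.modify d ("overlap_" ++ n) 0 (· + 1)) d)
        (PySem.Dict.mk (gl.map (fun p => ("overlap_" ++ p.1, f p))))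
      = PySem.Dict.mk (gl.map (fun p =>
          ("overlap_" ++ p.1,
            f p + ((gs.filter (fun g => p.2.contains g)).length : Int)))) := by
  intro gs
  induction gs with
  | nil => intro f; simp
  | cons g gs ih =>
    intro f
    rw [List.foldl_cons, pv_bumps gl hfst (idxf g) f (hidx g), ih]
    congr 1
    apply List.map_congr_left
    intro p hp
    rw [hcount g p hp]
    by_cases hc : g ∈ p.2 <;> simp [List.filter_cons, hc] <;> push_cast <;> ring

-- ===== VERDICT (by name: the statement is the Claim_ definition above) =====
theorem compute_gene_list_overlaps_spec : Claim_equal_compute_gene_list_overlaps := by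
  intro selected_genes gene_lists _ hpre
  obtain ⟨hfst, hinner⟩ := hpre
  unfold Spec_compute_gene_list_overlaps
  unfold compute_gene_list_overlaps compute_gene_list_overlaps_alt
  have hnd := pv_keys_nodup hfst
  -- names of the lists containing g
  set ns : String → List String :=
    fun g => (gene_lists.filter (fun p => p.2.contains g)).map Prod.fst with hns
  -- the index dict looks up exactly ns
  have hindex : ∀ g,
      (gene_lists.foldl
        (fun idx p => p.2.foldl (fun idx g => PySem.Dict.modify idx g [] (· ++ [p.1])) idx)
        PySem.Dict.empty).getD g []
      = ns g := by
    intro g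
    rw [pv_flatten, PySem.Dict.getD_foldl_modify_append, PySem.Dict.getD_empty,
      List.nil_append, hns]
    exact pv_names g gene_lists hinner
  -- B's init fold: fresh distinct keys append, all zero
  have hB0 : gene_lists.foldl (fun d p => PySem.Dict.insert d ("overlap_" ++ p.1) 0)
      PySem.Dict.empty
      = PySem.Dict.mk (gene_lists.map (fun p => ("overlap_" ++ p.1, (0 : Int)))) := by
    apply PySem.Dict.ext
    simpa [PySem.Dict.empty] using
      PySem.Dict.items_foldl_insert_fresh gene_lists (fun p => "overlap_" ++ p.1)
        (fun _ => (0 : Int)) PySem.Dict.empty (by intro a _; simp) hnd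
  -- A's fold: fresh distinct keys append
  have hA := PySem.Dict.items_foldl_insert_fresh gene_lists
    (fun p => "overlap_" ++ p.1)
    (fun p => ((PySem.Set.inter (PySem.Set.ofList selected_genes) p.2).length : Int))
    PySem.Dict.empty (by intro a _; simp) hnd
  have hidx : ∀ g, ∀ n ∈ ns g, n ∈ gene_lists.map Prod.fst := by
    intro g n hn
    rw [hns] at hn
    rcases List.mem_map.mp hn with ⟨q, hq, rfl⟩
    exact List.mem_map_of_mem (List.mem_of_mem_filter hq)
  have hcount : ∀ g, ∀ p ∈ gene_lists,
      ((ns g).count p.1 : Int) = if p.2.contains g then 1 else 0 := by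
    intro g p hp
    have hnsnd : (ns g).Nodup := by
      rw [hns]
      have hsub : (gene_lists.filter (fun p => p.2.contains g)).Sublist gene_lists :=
        List.filter_sublist
      exact List.Nodup.sublist (hsub.map Prod.fst) hfst
    have hmem_iff : p.1 ∈ ns g ↔ p.2.contains g = true := by
      rw [hns]
      constructor
      · intro h
        rcases List.mem_map.mp h with ⟨q, hq, hq1⟩
        rcases List.mem_filter.mp hq with ⟨hqgl, hqc⟩
        have : q = p := List.inj_on_of_nodup_map hfst hqgl hp hq1
        exact this ▸ hqc
      · intro h
        exact List.mem_map_of_mem (List.mem_filter.mpr ⟨hp, h⟩)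
    by_cases hc : g ∈ p.2
    · have hcb : p.2.contains g = true := by simpa using hc
      have h1 : (ns g).count p.1 = 1 := List.count_eq_one_of_mem hnsnd (hmem_iff.mpr hcb)
      simp [h1, hc]
    · have h0 : (ns g).count p.1 = 0 := List.count_eq_zero_of_not_mem
        (fun h => hc (by simpa using hmem_iff.mp h))
      simp [h0, hc]
  simp only []
  rw [hB0]
  have hfun :
      (fun (d : PySem.Dict String Int) g =>
        ((gene_lists.foldl
          (fun idx p => p.2.foldl (fun idx g => PySem.Dict.modify idx g [] (· ++ [p.1])) idx)
          PySem.Dict.empty).getD g []).foldl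
          (fun d name => PySem.Dict.modify d ("overlap_" ++ name) 0 (· + 1)) d)
      = (fun d g =>
        (ns g).foldl (fun d name => PySem.Dict.modify d ("overlap_" ++ name) 0 (· + 1)) d) := by
    funext d g
    rw [hindex g]
  rw [hfun, pv_outer gene_lists hfst ns hidx hcount]
  rw [show (gene_lists.foldl (fun overlaps p =>
      PySem.Dict.insert overlaps ("overlap_" ++ p.1)
        ((PySem.Set.inter (PySem.Set.ofList selected_genes) p.2).length : Int))
      PySem.Dict.empty).items
    = gene_lists.map (fun p =>
        ("overlap_" ++ p.1,
          ((PySem.Set.inter (PySem.Set.ofList selected_genes) p.2).length : Int))) from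
    by simpa [PySem.Dict.empty] using hA]
  apply List.map_congr_left
  intro p _
  simp [PySem.Set.inter, PySem.Set.contains]
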